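-- pv_equiv track=rewrite | github.com/pawlowski2115/prg-basics | mock-test/p1.py | f
-- ===== SOURCE A (Python) =====
-- def f(word):
--     l = len(word)
--     arr = []
--     for i in range(l):
--         result = ""
--         for j in range(l):
--             if i == j:
--                 result += word[j].upper()
--             else:
--                 result += word[j].lower()
--         arr.append(result)
--     return "-".join(arr)
-- ===== SOURCE B (Python) =====
-- def f(word):
--     low = word.lower()
--     rows = [low[:i] + word[i].upper() + low[i+1:] for i in range(len(word))]
--     return "-".join(rows)
-- ===== Notes on version B (the rewrite author's own statement) =====
-- stated objective: simpler
-- what changed: Replaces the nested character-by-character loop with one precomputed lowercased copy and per-row slice concatenation low[:i] + word[i].upper() + low[i+1:], removing the inner loop.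
import Mathlib
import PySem

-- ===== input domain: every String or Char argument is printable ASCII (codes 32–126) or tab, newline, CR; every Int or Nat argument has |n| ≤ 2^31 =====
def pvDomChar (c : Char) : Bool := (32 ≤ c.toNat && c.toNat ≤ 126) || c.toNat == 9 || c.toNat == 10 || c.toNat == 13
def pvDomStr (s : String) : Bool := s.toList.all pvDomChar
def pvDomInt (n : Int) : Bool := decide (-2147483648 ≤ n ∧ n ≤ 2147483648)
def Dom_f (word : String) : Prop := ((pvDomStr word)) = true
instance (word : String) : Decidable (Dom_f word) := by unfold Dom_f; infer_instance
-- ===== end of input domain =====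

-- B builds each row from one precomputed lowercased copy by slice concatenation instead of A's inner per-character loop (simpler).

-- ===== PORT A =====
def f (word : String) : String :=
  let cs := word.toList
  let l : Int := cs.length
  let arr := (PySem.List.pyRange 0 l 1).foldl (fun arr i =>
    let result := (PySem.List.pyRange 0 l 1).foldl (fun result j =>
      result ++ (if i == j then [PySem.Chars.upperChar (PySem.List.pyGetD cs j ' ')]
                 else [PySem.Chars.lowerChar (PySem.List.pyGetD cs j ' ')])) ([] : List Char)
    arr ++ [result]) ([] : List (List Char))
  String.ofList (PySem.Chars.join ['-'] arr)

-- ===== PORT B =====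
def f_alt (word : String) : String :=
  let cs := word.toList
  let low := PySem.Chars.lower cs
  let rows := (PySem.List.pyRange 0 (cs.length : Int) 1).map (fun i =>
    PySem.List.slice low none (some i)
      ++ [PySem.Chars.upperChar (PySem.List.pyGetD cs i ' ')]
      ++ PySem.List.slice low (some (i + 1)) none)
  String.ofList (PySem.Chars.join ['-'] rows)

-- ===== PRECONDITION & SPEC =====
def Spec_f (word : String) (out : String) : Prop := out = f_alt word
instance (word : String) (out : String) : Decidable (Spec_f word out) := by unfold Spec_f; infer_instance

-- ===== CLAIM (what is proved, stated in full; the proofs are below) =====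
def Claim_equal_f : Prop := ∀ (word : String), Dom_f word → Spec_f word (f word)

-- ===== LEMMAS AND PROOFS =====

theorem pv_ite_singleton (c : Bool) (a b : Char) :
    (if c = true then [a] else [b]) = [if c = true then a else b] := by cases c <;> simp

theorem pv_row_eq (cs : List Char) (i : Nat) (hi : i < cs.length) :
    (PySem.List.pyRange 0 (cs.length : Int) 1).foldl (fun result j =>
      result ++ (if (i : Int) == j then [PySem.Chars.upperChar (PySem.List.pyGetD cs j ' ')]
                 else [PySem.Chars.lowerChar (PySem.List.pyGetD cs j ' ')])) ([] : List Char)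
    = PySem.List.slice (PySem.Chars.lower cs) none (some (i : Int))
      ++ [PySem.Chars.upperChar (PySem.List.pyGetD cs (i : Int) ' ')]
      ++ PySem.List.slice (PySem.Chars.lower cs) (some ((i : Int) + 1)) none := by
  have hlow : PySem.Chars.lower cs = cs.map PySem.Chars.lowerChar := by
    simp [PySem.Chars.lower]
  have h2 : PySem.List.slice (PySem.Chars.lower cs) (some ((i : Int) + 1)) none
      = (PySem.Chars.lower cs).drop (i + 1) := by
    have := PySem.List.slice_from_natCast (PySem.Chars.lower cs) (i + 1)
    push_cast at this
    exact this
  rw [PySem.List.pyRange_zero_natCast, List.foldl_map]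
  simp only [pv_ite_singleton]
  rw [PySem.List.foldl_append_singleton_eq_map, List.nil_append,
    PySem.List.slice_to_natCast, h2, hlow]
  have hset : (cs.map PySem.Chars.lowerChar).take i
        ++ [PySem.Chars.upperChar (PySem.List.pyGetD cs (i : Int) ' ')]
        ++ (cs.map PySem.Chars.lowerChar).drop (i + 1)
      = (cs.map PySem.Chars.lowerChar).set i
          (PySem.Chars.upperChar (PySem.List.pyGetD cs (i : Int) ' ')) := by
    rw [List.set_eq_take_append_cons_drop, if_pos (by simpa using hi)]
    simp
  rw [hset]
  apply List.ext_getElem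
  · simp
  · intro k hk1 hk2
    simp only [List.length_map, List.length_range] at hk1
    rw [List.getElem_map, List.getElem_range, List.getElem_set]
    by_cases hik : i = k
    · subst hik
      simp [PySem.List.pyGetD_natCast]
    · have hbeq : ((i : Int) == (k : Int)) = false := by
        simp only [beq_eq_false_iff_ne, ne_eq, Int.natCast_inj]
        omega
      rw [if_neg hik]
      simp only [hbeq, Bool.false_eq_true, if_false, PySem.List.pyGetD_natCast,
        List.getElem_map, List.getD_eq_getElem cs ' ' hk1]

theorem pv_main (cs : List Char) :
    ((PySem.List.pyRange 0 (cs.length : Int) 1).foldl (fun arr i =>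
      arr ++ [(PySem.List.pyRange 0 (cs.length : Int) 1).foldl (fun result j =>
        result ++ (if i == j then [PySem.Chars.upperChar (PySem.List.pyGetD cs j ' ')]
                   else [PySem.Chars.lowerChar (PySem.List.pyGetD cs j ' ')])) ([] : List Char)])
      ([] : List (List Char)))
    = (PySem.List.pyRange 0 (cs.length : Int) 1).map (fun i =>
        PySem.List.slice (PySem.Chars.lower cs) none (some i)
          ++ [PySem.Chars.upperChar (PySem.List.pyGetD cs i ' ')]
          ++ PySem.List.slice (PySem.Chars.lower cs) (some (i + 1)) none) := by
  rw [PySem.List.foldl_append_singleton_eq_map, List.nil_append]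
  apply List.map_congr_left
  intro a ha
  rw [PySem.List.mem_pyRange_one] at ha
  obtain ⟨h0, hn⟩ := ha
  have hk : a = ((a.toNat : Nat) : Int) := by omega
  rw [hk]
  exact pv_row_eq cs a.toNat (by omega)

-- ===== VERDICT (by name: the statement is the Claim_ definition above) =====
theorem f_spec : Claim_equal_f := by
  intro word _
  unfold Spec_f f f_alt
  simp only []
  rw [pv_main word.toList]
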